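-- pv_equiv track=rewrite | github.com/hworrede/Coding-Projects | Python_Projects/sum.py | sum_list_helper
-- ===== SOURCE A (Python) =====
-- def sum_list_helper(test, i, curr_sum):
--   if len(test) == 0:
--     return None
--   if i < len(test):
--     curr_sum += test[i]
--     x = sum_list_helper(test, i+1, curr_sum)
--     return x
--   else:
--     return curr_sum
-- ===== SOURCE B (Python) =====
-- def sum_list_helper(test, i, curr_sum):
--   if len(test) == 0:
--     return None
--   for j in range(i, len(test)):
--     curr_sum += test[j]
--   return curr_sum
-- ===== Notes on version B (the rewrite author's own statement) =====
-- stated objective: simpler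
-- what changed: Replaces A's element-by-element recursion with an iterative for-loop over range(i, len(test)) accumulating into curr_sum.
import Mathlib
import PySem

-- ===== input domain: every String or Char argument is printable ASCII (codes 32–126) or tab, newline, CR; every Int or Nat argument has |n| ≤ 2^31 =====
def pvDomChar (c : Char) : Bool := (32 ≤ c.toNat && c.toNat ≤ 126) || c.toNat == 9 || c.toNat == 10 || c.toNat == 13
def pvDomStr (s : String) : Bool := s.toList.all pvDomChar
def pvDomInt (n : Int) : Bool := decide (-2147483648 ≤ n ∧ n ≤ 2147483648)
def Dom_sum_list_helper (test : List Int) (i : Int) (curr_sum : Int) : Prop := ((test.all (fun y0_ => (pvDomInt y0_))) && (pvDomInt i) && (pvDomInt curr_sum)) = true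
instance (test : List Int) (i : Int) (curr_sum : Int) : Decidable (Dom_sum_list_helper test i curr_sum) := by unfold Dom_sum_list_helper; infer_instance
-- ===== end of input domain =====

-- B replaces A's recursion with an iterative for-loop over range(i, len(test)); same values, constant stack.

-- ===== PORT A =====
def sum_list_helper (test : List Int) (i : Int) (curr_sum : Int) : Option Int :=
  if test.length = 0 then none
  else if h : i < (test.length : Int) then
    match PySem.List.pyGet? test i with
    | none => none   -- IndexError in Python (i < -len); excluded by Pre_sum_list_helper
    | some v => sum_list_helper test (i + 1) (curr_sum + v)
  else some curr_sum
termination_by ((test.length : Int) - i).toNat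
decreasing_by omega

-- ===== PORT B =====
-- for j in range(i, len(test)): curr_sum += test[j]; the Option accumulator is
-- none exactly where Python's test[j] raises IndexError (excluded by Pre_).
def sum_list_helper_alt (test : List Int) (i : Int) (curr_sum : Int) : Option Int :=
  if test.length = 0 then none
  else
    (PySem.List.pyRange i (test.length : Int) 1).foldl
      (fun acc j => acc.bind fun s => (PySem.List.pyGet? test j).map fun v => s + v)
      (some curr_sum)

-- ===== PRECONDITION & SPEC =====
-- Pre_ excludes exactly the inputs where A raises IndexError: nonempty test with i < -len(test).
def Pre_sum_list_helper (test : List Int) (i : Int) (curr_sum : Int) : Prop :=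
  test = [] ∨ -(test.length : Int) ≤ i
instance (test : List Int) (i : Int) (curr_sum : Int) : Decidable (Pre_sum_list_helper test i curr_sum) := by unfold Pre_sum_list_helper; infer_instance
def pvWitness_sum_list_helper : List Int × Int × Int := ([1, 2, 3], 1, 0)

def Spec_sum_list_helper (test : List Int) (i : Int) (curr_sum : Int) (out : Option Int) : Prop := out = sum_list_helper_alt test i curr_sum
instance (test : List Int) (i : Int) (curr_sum : Int) (out : Option Int) : Decidable (Spec_sum_list_helper test i curr_sum out) := by unfold Spec_sum_list_helper; infer_instance

-- ===== CLAIM =====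
def Claim_equal_sum_list_helper : Prop := ∀ (test : List Int) (i : Int) (curr_sum : Int), Dom_sum_list_helper test i curr_sum → Pre_sum_list_helper test i curr_sum → Spec_sum_list_helper test i curr_sum (sum_list_helper test i curr_sum)

-- ===== LEMMAS AND PROOFS =====

-- Python never raises inside Pre_: the indexed read succeeds
theorem pyGet?_isSome (t : List Int) (i : Int) (hlo : -(t.length : Int) ≤ i)
    (hlt : i < (t.length : Int)) : ∃ v, PySem.List.pyGet? t i = some v := by
  by_cases hi : (0:Int) ≤ i
  · have hidx : i.toNat < t.length := by omega
    exact ⟨t[i.toNat], by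
      simp [PySem.List.pyGet?, PySem.List.pyIdx?, if_pos hi, if_pos hlt]⟩
  · have hidx : t.length - (-i).toNat < t.length := by omega
    exact ⟨t[t.length - (-i).toNat], by
      simp [PySem.List.pyGet?, PySem.List.pyIdx?, hi, if_pos hlo]⟩

theorem main_eq (n : Nat) : ∀ (test : List Int) (i curr_sum : Int),
    ((test.length : Int) - i).toNat ≤ n → Pre_sum_list_helper test i curr_sum →
    sum_list_helper test i curr_sum = sum_list_helper_alt test i curr_sum := by
  induction n with
  | zero =>
    intro test i cs hn hpre
    rw [sum_list_helper]
    by_cases h0 : test.length = 0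
    · rw [if_pos h0]; unfold sum_list_helper_alt; rw [if_pos h0]
    · rw [if_neg h0, dif_neg (by omega : ¬ i < (test.length : Int))]
      unfold sum_list_helper_alt
      rw [if_neg h0, PySem.List.pyRange_one_eq_nil (by omega)]
      rfl
  | succ n ih =>
    intro test i cs hn hpre
    rw [sum_list_helper]
    by_cases h0 : test.length = 0
    · rw [if_pos h0]; unfold sum_list_helper_alt; rw [if_pos h0]
    · rw [if_neg h0]
      have hlo : -(test.length : Int) ≤ i := by
        rcases hpre with h | h
        · exact absurd (by simp [h]) h0
        · exact h
      by_cases hlt : i < (test.length : Int)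
      · rw [dif_pos hlt]
        obtain ⟨v, hget⟩ := pyGet?_isSome test i hlo hlt
        rw [hget]
        show sum_list_helper test (i + 1) (cs + v) = sum_list_helper_alt test i cs
        rw [ih test (i + 1) (cs + v) (by omega) (Or.inr (by omega))]
        unfold sum_list_helper_alt
        rw [if_neg h0, if_neg h0, PySem.List.pyRange_one_cons hlt, List.foldl_cons]
        simp [hget]
      · rw [dif_neg hlt]
        unfold sum_list_helper_alt
        rw [if_neg h0, PySem.List.pyRange_one_eq_nil (by omega)]
        rfl

-- ===== VERDICT =====
theorem sum_list_helper_spec : Claim_equal_sum_list_helper := by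
  intro test i cs _ hpre
  unfold Spec_sum_list_helper
  exact main_eq ((test.length : Int) - i).toNat test i cs le_rfl hpre
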